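-- pv_equiv track=rewrite | github.com/brianSalk/Daily-Problems | spelling_bee/simulation.py | count_unique_spelling_bees
-- ===== SOURCE A (Python) =====
-- import itertools
--
-- def count_unique_spelling_bees(alphabet, vowels, consonants):
--     def has_at_least_one_vowel(other_six, middle, vowels):
--         for vowel in vowels:
--             if vowel in other_six or vowel == middle:
--                 return True
--         return False
--
--     simulation_answer = 0
--     for middle in alphabet:
--         for other_six in itertools.combinations(alphabet, 6):
--             if middle not in other_six:
--                 simulation_answer += has_at_least_one_vowel(other_six, middle, vowels)
--     return simulation_answer
-- ===== SOURCE B (Python) =====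
-- def _comb(n, k):
--     if n < k:
--         return 0
--     num = 1
--     for i in range(k):
--         num *= n - i
--     den = 1
--     for i in range(k):
--         den *= i + 1
--     return num // den
--
-- def count_unique_spelling_bees(alphabet, vowels, consonants):
--     n = len(alphabet)
--     vow = set(vowels)
--     cnt = {}
--     for ch in alphabet:
--         cnt[ch] = cnt.get(ch, 0) + 1
--     nonvowel = 0
--     for ch, c in cnt.items():
--         if ch not in vow:
--             nonvowel += c
--     total = 0
--     for middle in alphabet:
--         avail = n - cnt[middle]
--         if middle in vow:
--             total += _comb(avail, 6)
--         else:
--             total += _comb(avail, 6) - _comb(nonvowel - cnt[middle], 6)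
--     return total
-- ===== Notes on version B (the rewrite author's own statement) =====
-- stated objective: faster
-- what changed: B replaces A's enumeration of every middle letter against all C(n,6) six-letter combinations by a closed-form count: it tallies letter multiplicities and non-vowel letters once, then for each middle letter adds comb(n-count(middle),6), subtracting comb(nonvowel-count(middle),6) when the middle is not a vowel.
import Mathlib
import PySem

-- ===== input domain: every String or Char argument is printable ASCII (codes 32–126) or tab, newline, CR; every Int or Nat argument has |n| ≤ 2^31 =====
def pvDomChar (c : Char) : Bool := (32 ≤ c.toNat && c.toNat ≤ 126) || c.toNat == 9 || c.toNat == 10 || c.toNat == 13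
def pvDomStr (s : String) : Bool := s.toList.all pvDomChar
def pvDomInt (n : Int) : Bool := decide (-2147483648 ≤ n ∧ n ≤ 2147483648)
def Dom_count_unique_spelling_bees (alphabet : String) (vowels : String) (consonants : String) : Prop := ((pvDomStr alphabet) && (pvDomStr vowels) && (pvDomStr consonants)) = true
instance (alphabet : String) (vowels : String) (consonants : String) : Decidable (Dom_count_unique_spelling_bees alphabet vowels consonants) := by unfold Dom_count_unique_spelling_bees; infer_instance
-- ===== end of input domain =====

-- B replaces A's enumeration of all middle/6-letter combinations by a closed-form
-- binomial count per middle letter (objective: faster, asymptotically).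

-- ===== PORT A =====
-- itertools.combinations(alphabet, 6), in itertools' order
def pvCombos : Nat → List Char → List (List Char)
  | 0, _ => [[]]
  | _ + 1, [] => []
  | k + 1, c :: cs => (pvCombos k cs).map (fun t => c :: t) ++ pvCombos (k + 1) cs

-- inner helper has_at_least_one_vowel (early-return loop over vowels)
def pvHasVowel (other_six : List Char) (middle : Char) (vowels : List Char) : Bool :=
  vowels.any (fun vowel => other_six.contains vowel || vowel == middle)

def count_unique_spelling_bees (alphabet : String) (vowels : String) (consonants : String) : Int :=
  alphabet.toList.foldl (fun acc middle =>
    (pvCombos 6 alphabet.toList).foldl (fun acc other_six =>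
      if !other_six.contains middle then
        acc + (if pvHasVowel other_six middle vowels.toList then 1 else 0)
      else acc) acc) 0

-- ===== PORT B =====
-- _comb(n, k): product of n-i, product of i+1, one floor division
def pvComb (n : Int) (k : Int) : Int :=
  if n < k then 0
  else
    let num := (PySem.List.pyRange 0 k 1).foldl (fun a i => a * (n - i)) 1
    let den := (PySem.List.pyRange 0 k 1).foldl (fun a i => a * (i + 1)) 1
    PySem.Int.floordiv num den

def count_unique_spelling_bees_alt (alphabet : String) (vowels : String) (consonants : String) : Int :=
  let al := alphabet.toList
  let n : Int := al.length
  let vow : PySem.Set Char := PySem.Set.ofList vowels.toList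
  let cnt := al.foldl (fun d ch => d.insert ch (d.getD ch 0 + 1)) PySem.Dict.empty
  let nonvowel := cnt.items.foldl (fun a p => if !(PySem.Set.contains vow p.1) then a + p.2 else a) 0
  al.foldl (fun total middle =>
    let avail := n - cnt.getD middle 0
    if PySem.Set.contains vow middle then total + pvComb avail 6
    else total + (pvComb avail 6 - pvComb (nonvowel - cnt.getD middle 0) 6)) 0

-- ===== PRECONDITION & SPEC =====
def Spec_count_unique_spelling_bees (alphabet : String) (vowels : String) (consonants : String) (out : Int) : Prop := out = count_unique_spelling_bees_alt alphabet vowels consonants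
instance (alphabet : String) (vowels : String) (consonants : String) (out : Int) : Decidable (Spec_count_unique_spelling_bees alphabet vowels consonants out) := by unfold Spec_count_unique_spelling_bees; infer_instance

-- ===== CLAIM (what is proved, stated in full; the proofs are below) =====
def Claim_equal_count_unique_spelling_bees : Prop := ∀ (alphabet : String) (vowels : String) (consonants : String), Dom_count_unique_spelling_bees alphabet vowels consonants → Spec_count_unique_spelling_bees alphabet vowels consonants (count_unique_spelling_bees alphabet vowels consonants)

-- ===== LEMMAS AND PROOFS =====

theorem pvComb_eq_choose (m : Nat) : pvComb (m : Int) 6 = (Nat.choose m 6 : Int) := by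
  unfold pvComb
  by_cases h : m < 6
  · rw [if_pos (by exact_mod_cast h), Nat.choose_eq_zero_of_lt h]; simp
  · rw [if_neg (by push_cast; omega)]
    obtain ⟨j, rfl⟩ : ∃ j, m = j + 6 := ⟨m - 6, by omega⟩
    have hr : PySem.List.pyRange 0 6 1 = [0, 1, 2, 3, 4, 5] := by decide
    rw [hr]
    have hnum : ([0, 1, 2, 3, 4, 5] : List Int).foldl (fun a i => a * (((j + 6 : Nat) : Int) - i)) 1
        = ((Nat.descFactorial (j + 6) 6 : Nat) : Int) := by
      simp [List.foldl, Nat.descFactorial]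
      push_cast
      ring
    have hden : ([0, 1, 2, 3, 4, 5] : List Int).foldl (fun a i => a * (i + 1)) 1 = ((720 : Nat) : Int) := by
      norm_num [List.foldl]
    rw [hnum, hden, PySem.Int.floordiv_natCast,
      Nat.choose_eq_descFactorial_div_factorial]
    norm_num [Nat.factorial]

theorem countP_combos (p : Char → Bool) (k : Nat) (L : List Char) :
    (pvCombos k L).countP (fun t => t.all p) = Nat.choose (L.countP p) k := by
  induction L generalizing k with
  | nil => cases k <;> simp [pvCombos]
  | cons c cs ih =>
    cases k with
    | zero => simp [pvCombos]
    | succ k =>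
      rw [pvCombos]
      rw [List.countP_append, List.countP_map]
      by_cases hc : p c
      · have : ((fun t => t.all p) ∘ fun t => c :: t) = fun t => t.all p := by
          funext t; simp [hc]
        rw [this, ih k, ih (k + 1)]
        simp [List.countP_cons, hc, Nat.choose_succ_succ]
      · have : ((fun t => t.all p) ∘ fun t => c :: t) = fun _ => false := by
          funext t; simp [hc]
        rw [this, ih (k + 1)]
        simp [List.countP_cons, hc]

theorem foldl_if_add_indicator (c d : List Char → Bool) (l : List (List Char)) (a : Int) :
    l.foldl (fun acc six => if c six then acc + (if d six then 1 else 0) else acc) a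
      = a + (l.countP (fun six => c six && d six) : Int) := by
  induction l generalizing a with
  | nil => simp
  | cons x l ih =>
    rw [List.foldl_cons, ih, List.countP_cons]
    by_cases hc : c x <;> by_cases hd : d x <;> simp [hc, hd] <;> push_cast <;> ring

theorem countP_split {α : Type} (c d : α → Bool) (l : List α) :
    l.countP c = l.countP (fun x => d x && c x) + l.countP (fun x => !d x && c x) := by
  induction l with
  | nil => simp
  | cons x l ih =>
    simp only [List.countP_cons, ih]
    by_cases hc : c x <;> by_cases hd : d x <;> simp [hc, hd] <;> omega

theorem set_contains_ofList (V : List Char) (x : Char) :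
    PySem.Set.contains (PySem.Set.ofList V) x = V.contains x := by
  by_cases h : x ∈ V <;>
    simp [PySem.Set.contains, PySem.Set.mem_ofList, h, List.contains_iff_mem]

theorem countP_mem_cons (k : Char) (S' : List Char) (q : Char → Bool) (hk : k ∉ S') (L : List Char) :
    L.countP (fun x => decide (x ∈ (k :: S')) && q x)
      = (if q k then L.count k else 0) + L.countP (fun x => decide (x ∈ S') && q x) := by
  induction L with
  | nil => simp
  | cons y L ih =>
    simp only [List.countP_cons, List.count_cons, ih]
    by_cases hy : y = k
    · subst hy
      have : y ∉ S' := hk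
      by_cases hq : q y <;> simp [this, hq] <;> omega
    · simp only [List.mem_cons, hy, false_or, beq_iff_eq, if_neg hy]
      by_cases hm : y ∈ S' <;> by_cases hq : q y <;> simp [hm, hq] <;> omega

theorem foldl_set_count (q : Char → Bool) (L : List Char) (S : List Char) (a : Int)
    (hS : S.Nodup) :
    S.foldl (fun a k => if q k then a + (L.count k : Int) else a) a
      = a + ((L.countP (fun x => decide (x ∈ S) && q x)) : Int) := by
  induction S generalizing a with
  | nil => simp
  | cons k S' ih =>
    have hk : k ∉ S' := (List.nodup_cons.mp hS).1
    rw [List.foldl_cons, ih _ (List.nodup_cons.mp hS).2,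
      countP_mem_cons k S' q hk L]
    by_cases hq : q k <;> simp [hq] <;> push_cast <;> ring

theorem sum_items_counter (L V : List Char) :
    ((PySem.Dict.counter L).items).foldl
        (fun a p => if !(PySem.Set.contains (PySem.Set.ofList V) p.1) then a + p.2 else a) 0
      = (L.countP (fun x => !(V.contains x)) : Int) := by
  rw [PySem.Dict.items_counter, List.foldl_map]
  have h := foldl_set_count (fun k => !(PySem.Set.contains (PySem.Set.ofList V) k)) L
      (PySem.Set.ofList L) 0 (PySem.Set.nodup_ofList L)
  simp only [h, zero_add]
  congr 1
  apply List.countP_congr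
  intro x hx
  simp [PySem.Set.mem_ofList, hx, set_contains_ofList]

theorem not_contains_eq_all (mid : Char) (six : List Char) :
    (!six.contains mid) = six.all (fun x => x != mid) := by
  induction six with
  | nil => rfl
  | cons y t ih =>
    simp only [List.contains_cons, Bool.not_or, ih, List.all_cons, bne]
    congr 1
    by_cases h : y = mid <;> simp [h] <;> exact fun hh => h (by simpa using hh.symm)

theorem all_and_chars (p q : Char → Bool) (six : List Char) :
    (six.all p && six.all q) = six.all (fun x => p x && q x) := by
  induction six with
  | nil => rfl
  | cons y t ih =>
    simp only [List.all_cons, ← ih]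
    by_cases hp : p y <;> by_cases hq : q y <;> simp [hp, hq]

theorem countP_bne (mid : Char) (L : List Char) :
    L.countP (fun x => x != mid) = L.length - L.count mid := by
  induction L with
  | nil => simp
  | cons y t ih =>
    have h1 : t.count mid ≤ t.length := List.count_le_length
    by_cases h : y = mid <;>
      simp [List.countP_cons, List.count_cons, h, ih] <;> omega

theorem countP_nv (V : List Char) (mid : Char) (hm : mid ∉ V) (L : List Char) :
    L.count mid ≤ L.countP (fun x => !(V.contains x)) ∧
    L.countP (fun x => x != mid && !(V.contains x))
      = L.countP (fun x => !(V.contains x)) - L.count mid := by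
  induction L with
  | nil => simp
  | cons y t ih =>
    obtain ⟨ih1, ih2⟩ := ih
    by_cases h : y = mid
    · subst h
      have h1 : V.contains y = false := by simpa using hm
      simp only [List.countP_cons, List.count_cons, h1, bne_self_eq_false, Bool.false_and,
        Bool.not_false, Bool.and_true, beq_self_eq_true, if_pos, Bool.false_eq_true,
        not_false_eq_true, if_false, if_true]
      omega
    · have hbne : (y != mid) = true := by simp [bne, h]
      have hbeq : (y == mid) = false := by simp [h]
      by_cases hv : V.contains y = true
      · simp only [List.countP_cons, List.count_cons, hv, hbne, hbeq, Bool.not_true,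
          Bool.and_false, Bool.true_and, Bool.false_eq_true, not_false_eq_true, if_false]
        omega
      · have hv' : V.contains y = false := by simpa using hv
        simp only [List.countP_cons, List.count_cons, hv', hbne, hbeq, Bool.not_false,
          Bool.and_true, Bool.true_and, Bool.false_eq_true, not_false_eq_true, if_false,
          if_true, if_pos]
        omega

theorem per_middle (L V : List Char) (mid : Char) :
    ((pvCombos 6 L).countP
        (fun six => !six.contains mid && pvHasVowel six mid V) : Int)
      = (if PySem.Set.contains (PySem.Set.ofList V) mid then
           pvComb ((L.length : Int) - (L.count mid : Int)) 6
         else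
           pvComb ((L.length : Int) - (L.count mid : Int)) 6
             - pvComb ((L.countP (fun x => !(V.contains x)) : Int) - (L.count mid : Int)) 6) := by
  rw [set_contains_ofList]
  have hcount_le : L.count mid ≤ L.length := List.count_le_length
  have hlen : ((L.length : Int) - (L.count mid : Int)) = ((L.length - L.count mid : Nat) : Int) := by
    omega
  by_cases hm : mid ∈ V
  · have hmc : V.contains mid = true := by simpa using hm
    rw [if_pos hmc]
    have hv : (fun six => !six.contains mid && pvHasVowel six mid V)
        = fun six => six.all (fun x => x != mid) := by
      funext six
      have : pvHasVowel six mid V = true := by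
        simp only [pvHasVowel, List.any_eq_true]
        exact ⟨mid, hm, by simp⟩
      rw [this, Bool.and_true, not_contains_eq_all]
    rw [hv, countP_combos, countP_bne, hlen, pvComb_eq_choose]
  · have hmc : V.contains mid = false := by simpa using hm
    rw [if_neg (by rw [hmc]; simp)]
    have hv : ∀ six : List Char, pvHasVowel six mid V = six.any (fun x => V.contains x) := by
      intro six
      simp only [pvHasVowel]
      apply Bool.eq_iff_iff.mpr
      simp only [List.any_eq_true, List.contains_iff_mem]
      constructor
      · rintro ⟨v, hvV, hc⟩
        rcases Bool.or_eq_true_iff.mp hc with h | h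
        · exact ⟨v, by simpa using h, by simpa using hvV⟩
        · exact absurd (by simpa using h : v = mid) (fun e => hm (e ▸ hvV))
      · rintro ⟨x, hx, hxV⟩
        exact ⟨x, by simpa using hxV, Bool.or_eq_true_iff.mpr (Or.inl (by simpa using hx))⟩
    have hsplit := countP_split (fun six : List Char => !six.contains mid)
      (fun six => pvHasVowel six mid V) (pvCombos 6 L)
    have hswap : (pvCombos 6 L).countP (fun six => !six.contains mid && pvHasVowel six mid V)
        = (pvCombos 6 L).countP (fun six => pvHasVowel six mid V && !six.contains mid) := by
      congr 1; funext six; exact Bool.and_comm _ _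
    have hall : (pvCombos 6 L).countP (fun six => !pvHasVowel six mid V && !six.contains mid)
        = Nat.choose (L.countP (fun x => x != mid && !(V.contains x))) 6 := by
      have : (fun six : List Char => !pvHasVowel six mid V && !six.contains mid)
          = fun six => six.all (fun x => x != mid && !(V.contains x)) := by
        funext six
        rw [hv six, not_contains_eq_all]
        have hany : (!six.any fun x => V.contains x) = six.all (fun x => !(V.contains x)) := by
          rw [List.any_eq_not_all_not, Bool.not_not]
        rw [hany, Bool.and_comm, all_and_chars]
      rw [this, countP_combos]
    have hc' : (pvCombos 6 L).countP (fun six => !six.contains mid)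
        = Nat.choose (L.length - L.count mid) 6 := by
      have : (fun six : List Char => !six.contains mid)
          = fun six => six.all (fun x => x != mid) := by
        funext six; exact not_contains_eq_all mid six
      rw [this, countP_combos, countP_bne]
    obtain ⟨hle, heq⟩ := countP_nv V mid hm L
    have hnv : ((L.countP (fun x => !(V.contains x)) : Int) - (L.count mid : Int))
        = ((L.countP (fun x => !(V.contains x)) - L.count mid : Nat) : Int) := by omega
    rw [hswap, hlen, hnv, pvComb_eq_choose, pvComb_eq_choose, ← heq, ← hall, ← hc']
    omega

-- ===== VERDICT (by name: the statement is the Claim_ definition above) =====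
theorem count_unique_spelling_bees_spec : Claim_equal_count_unique_spelling_bees := by
  intro alphabet vowels consonants _
  unfold Spec_count_unique_spelling_bees
  simp only [count_unique_spelling_bees, count_unique_spelling_bees_alt,
    PySem.Dict.foldl_insert_getD_add_one_eq_counter, sum_items_counter,
    PySem.Dict.getD_counter]
  congr 1
  funext acc mid
  rw [foldl_if_add_indicator (fun six => !six.contains mid)
    (fun six => pvHasVowel six mid vowels.toList) (pvCombos 6 alphabet.toList) acc,
    per_middle alphabet.toList vowels.toList mid]
  by_cases h : mid ∈ vowels.toList <;> simp [h]
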